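-- pv_equiv track=rewrite | github.com/mukesh-Guntumadugu/llm_beatmap_generator | src/analysis/llm_beatmap_metrics.py | _count_crossovers
-- ===== SOURCE A (Python) =====
-- from typing import Dict, List, Optional, Tuple
--
-- def _count_crossovers(seq: List[Tuple[int, ...]], min_len: int = 4) -> int:
--     """Count runs of alternating left↔right or up↔down single taps."""
--     LR = ({0}, {3})   # columns 0 (Left) and 3 (Right)
--     UD = ({1}, {2})   # columns 1 (Down) and 2 (Up)
--     count = run = 0
--     last_col: Optional[int] = None
--     last_pair: Optional[Tuple] = None
--
--     for tup in seq:
--         if sum(tup) != 1: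
--             if run >= min_len:
--                 count += 1
--             run = 0
--             last_col = last_pair = None
--             continue
--
--         col = tup.index(1)
--
--         if last_col is None:
--             run = 1
--             last_col = col
--             # Determine pair
--             if col in LR[0] or col in LR[1]:
--                 last_pair = LR
--             elif col in UD[0] or col in UD[1]:
--                 last_pair = UD
--             else:
--                 last_pair = None
--         else:
--             # Continue if same pair and alternates
--             if last_pair and col != last_col and (
--                 (col in last_pair[0] and last_col in last_pair[1]) or
--                 (col in last_pair[1] and last_col in last_pair[0])
--             ):
--                 run += 1
--                 last_col = col
--             else:
--                 if run >= min_len: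
--                     count += 1
--                 run = 1
--                 last_col = col
--                 if col in LR[0] or col in LR[1]:
--                     last_pair = LR
--                 elif col in UD[0] or col in UD[1]:
--                     last_pair = UD
--                 else:
--                     last_pair = None
--
--     if run >= min_len:
--         count += 1
--     return count
-- ===== SOURCE B (Python) =====
-- from typing import List, Optional, Tuple
--
-- def _count_crossovers(seq: List[Tuple[int, ...]], min_len: int = 4) -> int:
--     """Count alternating left-right / up-down tap runs by locating the run-boundary
--     events and measuring the run that ends at each boundary backwards."""
--     grp = {0: 'LR', 3: 'LR', 1: 'UD', 2: 'UD'}.get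
--     cols: List[Optional[int]] = [t.index(1) if sum(t) == 1 else None for t in seq]
--     n = len(cols)
--
--     def linked(i: int) -> bool:
--         # token i continues an alternating same-pair run from token i-1
--         a, b = cols[i - 1], cols[i]
--         return (a is not None and b is not None and grp(b) is not None
--                 and grp(b) == grp(a) and b != a)
--
--     count = 0
--     for i in range(n + 1):  # boundary i sits just before token i; i == n is the end
--         if not (i == n or cols[i] is None
--                 or (i > 0 and cols[i - 1] is not None and not linked(i))):
--             continue  # no run ends at this boundary
--         if i > 0 and cols[i - 1] is not None:
--             s = i - 1
--             while s > 0 and linked(s):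
--                 s -= 1
--             length = i - s  # the run of taps cols[s..i-1] ends here
--         else:
--             length = 0
--         if length >= min_len:
--             count += 1
--     return count
-- ===== Notes on version B (the rewrite author's own statement) =====
-- stated objective: alternative
-- what changed: Replaces A's fused forward state machine (mutable count/run/last_col/last_pair with set-pair objects) by a boundary-event algorithm: tokenize columns once, define a pairwise linked(i) predicate from a group dict, iterate over the n+1 boundaries detecting where a run ends, and measure each ended run by a backward scan over links instead of carrying a run counter.
import Mathlib
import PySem

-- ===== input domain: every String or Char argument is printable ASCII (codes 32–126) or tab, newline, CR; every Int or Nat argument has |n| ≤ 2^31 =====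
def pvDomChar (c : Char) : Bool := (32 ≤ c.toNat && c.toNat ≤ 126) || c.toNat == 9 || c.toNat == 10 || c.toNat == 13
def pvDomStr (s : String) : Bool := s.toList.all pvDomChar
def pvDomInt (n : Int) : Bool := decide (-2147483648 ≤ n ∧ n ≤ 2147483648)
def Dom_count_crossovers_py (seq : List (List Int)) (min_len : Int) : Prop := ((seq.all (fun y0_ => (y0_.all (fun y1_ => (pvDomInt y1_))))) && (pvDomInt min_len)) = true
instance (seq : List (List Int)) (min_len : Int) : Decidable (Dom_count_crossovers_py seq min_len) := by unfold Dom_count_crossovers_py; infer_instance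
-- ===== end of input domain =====

-- B replaces A's fused forward state machine by a boundary-event algorithm:
-- tokenize columns, detect run-ending boundaries, measure each ended run backwards.

-- ===== PORT A =====
-- LR / UD column pairs of A (sets {0},{3} / {1},{2} ported as one-element lists)
def pvPairLR : List Int × List Int := ([0], [3])
def pvPairUD : List Int × List Int := ([1], [2])

-- A's repeated "determine pair" block
def pvPairOf (col : Int) : Option (List Int × List Int) :=
  if col ∈ pvPairLR.1 ∨ col ∈ pvPairLR.2 then some pvPairLR
  else if col ∈ pvPairUD.1 ∨ col ∈ pvPairUD.2 then some pvPairUD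
  else none

-- one iteration of A's for-loop; state = (count, run, last_col, last_pair)
def pvStepA (min_len : Int) (st : Int × Int × Option Int × Option (List Int × List Int))
    (tup : List Int) : Int × Int × Option Int × Option (List Int × List Int) :=
  let count := st.1; let run := st.2.1; let lastCol := st.2.2.1; let lastPair := st.2.2.2
  if tup.sum ≠ 1 then
    ((if run ≥ min_len then count + 1 else count), 0, none, none)
  else
    -- tup.index(1): Pre_ guarantees 1 ∈ tup here, so index? is some; getD 0 is unreachable
    let col : Int := (((PySem.List.index? tup 1).getD 0 : Nat) : Int)
    match lastCol with
    | none => (count, 1, some col, pvPairOf col)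
    | some lc =>
      if (match lastPair with
          | some p => (col != lc) &&
              ((p.1.contains col && p.2.contains lc) || (p.2.contains col && p.1.contains lc))
          | none => false) then
        (count, run + 1, some col, lastPair)
      else
        ((if run ≥ min_len then count + 1 else count), 1, some col, pvPairOf col)

def count_crossovers_py (seq : List (List Int)) (min_len : Int) : Int :=
  let st := seq.foldl (pvStepA min_len) (0, 0, none, none)
  if st.2.1 ≥ min_len then st.1 + 1 else st.1

-- ===== PORT B =====
-- B's group dict {0:'LR',3:'LR',1:'UD',2:'UD'}
def pvColPair : PySem.Dict Int String :=
  PySem.Dict.ofList [(0, "LR"), (3, "LR"), (1, "UD"), (2, "UD")]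

-- the tokenizing comprehension: None for separators, the column for single taps
def pvCols (seq : List (List Int)) : List (Option Int) :=
  seq.map (fun t =>
    if t.sum = 1 then some (((PySem.List.index? t 1).getD 0 : Nat) : Int) else none)

-- B's linked(i): token i continues an alternating same-pair run from token i-1
-- (only called with 1 ≤ i < n, so the getD defaults are unreachable)
def pvLinked (cols : List (Option Int)) (i : Nat) : Bool :=
  match cols.getD (i - 1) none, cols.getD i none with
  | some a, some b => (pvColPair.get? b).isSome && (pvColPair.get? b == pvColPair.get? a) && (b != a)
  | _, _ => false

-- B's backward while loop  `s = i - 1; while s > 0 and linked(s): s -= 1`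
def pvBack (cols : List (Option Int)) : Nat → Nat
  | 0 => 0
  | s + 1 => if pvLinked cols (s + 1) then pvBack cols s else s + 1

-- one boundary i of B's for-loop (i = n is the end boundary); accumulates count only
def pvStepB (cols : List (Option Int)) (n : Nat) (min_len : Int) (count : Int) (i : Nat) : Int :=
  if !(i == n || (cols.getD i (some 0)).isNone ||
       (decide (0 < i) && (cols.getD (i - 1) none).isSome && !pvLinked cols i)) then
    count
  else
    let length : Int :=
      if decide (0 < i) && (cols.getD (i - 1) none).isSome then ((i - pvBack cols (i - 1) : Nat) : Int)
      else 0
    if length ≥ min_len then count + 1 else count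

def count_crossovers_py_alt (seq : List (List Int)) (min_len : Int) : Int :=
  let cols := pvCols seq
  let n := cols.length
  (List.range (n + 1)).foldl (pvStepB cols n min_len) 0

-- ===== PRECONDITION & SPEC =====
-- Pre_ excludes exactly the inputs where Python raises ValueError: a row whose elements
-- sum to 1 but which contains no element equal to 1 makes tup.index(1) raise (in A and in B).
def Pre_count_crossovers_py (seq : List (List Int)) (_min_len : Int) : Prop :=
  ∀ row ∈ seq, row.sum = 1 → (1 : Int) ∈ row
instance (seq : List (List Int)) (min_len : Int) : Decidable (Pre_count_crossovers_py seq min_len) := by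
  unfold Pre_count_crossovers_py; infer_instance

def pvWitness_count_crossovers_py : List (List Int) × Int :=
  ([[1, 0, 0, 0], [0, 0, 0, 1], [1, 0, 0, 0], [0, 2], [0, 1]], 2)

def Spec_count_crossovers_py (seq : List (List Int)) (min_len : Int) (out : Int) : Prop := out = count_crossovers_py_alt seq min_len
instance (seq : List (List Int)) (min_len : Int) (out : Int) : Decidable (Spec_count_crossovers_py seq min_len out) := by unfold Spec_count_crossovers_py; infer_instance

-- ===== CLAIM (what is proved, stated in full; the proofs are below) =====
def Claim_equal_count_crossovers_py : Prop := ∀ (seq : List (List Int)) (min_len : Int), Dom_count_crossovers_py seq min_len → Pre_count_crossovers_py seq min_len → Spec_count_crossovers_py seq min_len (count_crossovers_py seq min_len)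

-- ===== LEMMAS AND PROOFS =====

-- A's run/last_col after processing i tokens, expressed from the tokens alone
def pvPrev (cols : List (Option Int)) (i : Nat) : Option Int :=
  if i = 0 then none else cols.getD (i - 1) none

def pvRunAt (cols : List (Option Int)) (i : Nat) : Int :=
  if 0 < i ∧ (cols.getD (i - 1) none).isSome then ((i - pvBack cols (i - 1) : Nat) : Int) else 0

lemma pvBack_le (cols : List (Option Int)) (s : Nat) : pvBack cols s ≤ s := by
  induction s with
  | zero => simp [pvBack]
  | succ k ih =>
    unfold pvBack
    split
    · omega
    · omega

lemma pvRunAt_eq (cols : List (Option Int)) (i : Nat) :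
    pvRunAt cols i =
      (if decide (0 < i) && (cols.getD (i - 1) none).isSome
       then ((i - pvBack cols (i - 1) : Nat) : Int) else 0) := by
  unfold pvRunAt
  by_cases h1 : 0 < i <;> by_cases h2 : (cols.getD (i - 1) none).isSome <;> simp [h1]

lemma pvColPair_get (y : Int) :
    pvColPair.get? y =
      if y = 0 ∨ y = 3 then some "LR" else if y = 1 ∨ y = 2 then some "UD" else none := by
  simp only [pvColPair, PySem.Dict.ofList, PySem.Dict.update, List.foldl_cons, List.foldl_nil,
    PySem.Dict.get?_insert, PySem.Dict.get?_empty]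
  split_ifs <;> simp_all

lemma pvPairOf_eq (y : Int) :
    pvPairOf y =
      if y = 0 ∨ y = 3 then some pvPairLR else if y = 1 ∨ y = 2 then some pvPairUD else none := by
  simp [pvPairOf, pvPairLR, pvPairUD]

-- A's continuation test equals B's linked test
lemma pvCond_eq (col x : Int) :
    (match pvPairOf x with
     | some p => (col != x) &&
         ((p.1.contains col && p.2.contains x) || (p.2.contains col && p.1.contains x))
     | none => false)
    = ((pvColPair.get? col).isSome && (pvColPair.get? col == pvColPair.get? x) && (col != x)) := by
  rw [pvPairOf_eq, pvColPair_get, pvColPair_get]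
  by_cases h0 : x = 0 <;> by_cases h3 : x = 3 <;> by_cases h1 : x = 1 <;> by_cases h2 : x = 2 <;>
    by_cases c0 : col = 0 <;> by_cases c3 : col = 3 <;> by_cases c1 : col = 1 <;>
    by_cases c2 : col = 2 <;> simp_all [pvPairLR, pvPairUD]

-- columns mapped to the same existing group lie in the same pair
lemma pvPairOf_congr (col x : Int) (h : pvColPair.get? col = pvColPair.get? x)
    (hs : (pvColPair.get? col).isSome) : pvPairOf x = pvPairOf col := by
  simp only [pvColPair_get] at h hs
  rw [pvPairOf_eq, pvPairOf_eq]
  by_cases h0 : x = 0 <;> by_cases h3 : x = 3 <;> by_cases h1 : x = 1 <;> by_cases h2 : x = 2 <;>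
    by_cases c0 : col = 0 <;> by_cases c3 : col = 3 <;> by_cases c1 : col = 1 <;>
    by_cases c2 : col = 2 <;> simp_all

-- the loop invariant: A's state after i tokens vs B's partial count over boundaries < i
def pvInv (seq : List (List Int)) (min_len : Int) (i : Nat) : Prop :=
  let cols := pvCols seq
  let st := (seq.take i).foldl (pvStepA min_len) (0, 0, none, none)
  st.1 = (List.range i).foldl (pvStepB cols cols.length min_len) 0 ∧
  st.2.1 = pvRunAt cols i ∧
  st.2.2.1 = pvPrev cols i ∧
  st.2.2.2 = (pvPrev cols i).bind (fun c => pvPairOf c)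

lemma pvInv_zero (seq : List (List Int)) (min_len : Int) : pvInv seq min_len 0 := by
  simp [pvInv, pvRunAt, pvPrev]

lemma pvCols_getD (seq : List (List Int)) (i : Nat) (t : List Int) (h : seq[i]? = some t) :
    (pvCols seq).getD i none =
      (if t.sum = 1 then some (((PySem.List.index? t 1).getD 0 : Nat) : Int) else none) := by
  simp [pvCols, List.getD, List.getElem?_map, h]

lemma pvCols_length (seq : List (List Int)) : (pvCols seq).length = seq.length := by
  simp [pvCols]

lemma pvGetD_to_get? (cols : List (Option Int)) (i : Nat) (hi : i < cols.length) (v : Option Int)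
    (h : cols.getD i none = v) : cols[i]? = some v := by
  rw [List.getElem?_eq_getElem hi]
  rw [List.getD, List.getElem?_eq_getElem hi] at h
  simpa using h

lemma pvInv_step (seq : List (List Int)) (min_len : Int) (i : Nat) (hi : i < seq.length)
    (h : pvInv seq min_len i) : pvInv seq min_len (i + 1) := by
  obtain ⟨t, ht⟩ : ∃ t, seq[i]? = some t :=
    ⟨seq[i], List.getElem?_eq_getElem hi⟩
  have htake : seq.take (i + 1) = seq.take i ++ [t] := by
    rw [List.take_add_one]
    simp [ht]
  have hcols := pvCols_getD seq i t ht
  have hlen := pvCols_length seq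
  obtain ⟨hc, hr, hl, hp⟩ := h
  unfold pvInv
  rw [htake, List.range_succ]
  simp only [List.foldl_append, List.foldl_cons, List.foldl_nil]
  set cols := pvCols seq with hcolsdef
  set st := (seq.take i).foldl (pvStepA min_len) (0, 0, none, none) with hst
  have hin : i < cols.length := by rw [hlen]; exact hi
  have hne : (i == cols.length) = false := by simp; omega
  by_cases hsum : t.sum = 1
  · -- tap token
    set col : Int := (((PySem.List.index? t 1).getD 0 : Nat) : Int) with hcol
    have hci : cols.getD i none = some col := by rw [hcols]; simp [hsum]
    have hciE : cols[i]? = some (some col) := pvGetD_to_get? cols i hin _ hci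
    -- A's step on a tap
    have hstepA : pvStepA min_len st t =
        (match st.2.2.1 with
         | none => (st.1, 1, some col, pvPairOf col)
         | some lc =>
           if (match st.2.2.2 with
               | some p => (col != lc) &&
                   ((p.1.contains col && p.2.contains lc) || (p.2.contains col && p.1.contains lc))
               | none => false) then (st.1, st.2.1 + 1, some col, st.2.2.2)
           else ((if st.2.1 ≥ min_len then st.1 + 1 else st.1), 1, some col, pvPairOf col)) := by
      simp [pvStepA, hsum, hcol]
    cases hprev : pvPrev cols i with
    | none =>
      -- fresh start: i = 0 or the previous token is a separator
      have hl' : st.2.2.1 = none := by rw [hl, hprev]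
      have hprevD : 0 < i → cols.getD (i - 1) none = none := by
        intro hpos
        have h9 := hprev; unfold pvPrev at h9
        simpa [Nat.pos_iff_ne_zero.mp hpos] using h9
      have hnolink : 0 < i → pvLinked cols i = false := by
        intro hpos
        unfold pvLinked
        rw [hprevD hpos]
      have hback : pvBack cols i = i := by
        cases i with
        | zero => rfl
        | succ s => unfold pvBack; rw [hnolink (Nat.succ_pos s)]; simp
      refine ⟨?_, ?_, ?_, ?_⟩
      · rw [hstepA, hl']
        rw [pvStepB]
        rcases Nat.eq_zero_or_pos i with h0 | hpos
        · subst h0; simp [hne, List.getD, hciE, hc]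
        · have hprevE : cols[i - 1]? = some none :=
            pvGetD_to_get? cols (i - 1) (by omega) _ (hprevD hpos)
          simp [hne, List.getD, hciE, hprevE, hc]
      · rw [hstepA, hl']
        unfold pvRunAt
        simp [List.getD, hciE, hback]
      · rw [hstepA, hl']; unfold pvPrev; simp [List.getD, hciE]
      · rw [hstepA, hl']; unfold pvPrev; simp [List.getD, hciE]
    | some lc =>
      -- the previous token is a tap at column lc
      have hl' : st.2.2.1 = some lc := by rw [hl, hprev]
      have hp' : st.2.2.2 = pvPairOf lc := by rw [hp, hprev]; rfl
      have hpos : 0 < i := by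
        by_contra h0
        have h00 : i = 0 := by omega
        subst h00; unfold pvPrev at hprev; simp at hprev
      have hprevD : cols.getD (i - 1) none = some lc := by
        have h9 := hprev; unfold pvPrev at h9
        simpa [Nat.pos_iff_ne_zero.mp hpos] using h9
      have hprevE : cols[i - 1]? = some (some lc) :=
        pvGetD_to_get? cols (i - 1) (by omega) _ hprevD
      have hlink : pvLinked cols i =
          ((pvColPair.get? col).isSome && (pvColPair.get? col == pvColPair.get? lc) && (col != lc)) := by
        unfold pvLinked; rw [hprevD, hci]
      have hcond := pvCond_eq col lc
      by_cases hL : pvLinked cols i = true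
      · -- extends the run
        have hmatch : (match st.2.2.2 with
            | some p => (col != lc) &&
                ((p.1.contains col && p.2.contains lc) || (p.2.contains col && p.1.contains lc))
            | none => false) = true := by
          rw [hp', hcond, ← hlink]; exact hL
        have hback : pvBack cols i = pvBack cols (i - 1) := by
          obtain ⟨s, hs⟩ : ∃ s, i = s + 1 := ⟨i - 1, by omega⟩
          subst hs
          simp only [Nat.add_sub_cancel]
          rw [show pvBack cols (s + 1) = if pvLinked cols (s + 1) then pvBack cols s else s + 1
            from rfl, hL]
          simp
        refine ⟨?_, ?_, ?_, ?_⟩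
        · rw [hstepA, hl']
          simp only [hmatch, if_true]
          rw [pvStepB]
          simp [hne, List.getD, hciE, hprevE, hL, hc]
        · rw [hstepA, hl']
          simp only [hmatch, if_true]
          rw [hr]
          unfold pvRunAt
          have hble := pvBack_le cols (i - 1)
          rw [if_pos ⟨hpos, by rw [hprevD]; rfl⟩]
          rw [if_pos ⟨by omega, by simp only [Nat.add_sub_cancel]; rw [hci]; rfl⟩]
          simp only [Nat.add_sub_cancel, hback]
          omega
        · rw [hstepA, hl']; simp only [hmatch, if_true]; unfold pvPrev; simp [List.getD, hciE]
        · rw [hstepA, hl']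
          simp only [hmatch, if_true]
          unfold pvPrev
          have hsome : (pvColPair.get? col).isSome = true ∧ pvColPair.get? col = pvColPair.get? lc := by
            rw [hlink] at hL
            simp only [Bool.and_eq_true, beq_iff_eq, bne_iff_ne] at hL
            exact ⟨hL.1.1, hL.1.2⟩
          rw [hp']
          simp only [Nat.succ_ne_zero, if_false, Nat.add_sub_cancel, List.getD, hciE,
            Option.getD_some, Option.bind_some]
          exact pvPairOf_congr col lc hsome.2 hsome.1
      · -- breaks the run
        have hL' : pvLinked cols i = false := by simpa using hL
        have hmatch : (match st.2.2.2 with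
            | some p => (col != lc) &&
                ((p.1.contains col && p.2.contains lc) || (p.2.contains col && p.1.contains lc))
            | none => false) = false := by
          rw [hp', hcond, ← hlink]; exact hL'
        have hback : pvBack cols i = i := by
          obtain ⟨s, hs⟩ : ∃ s, i = s + 1 := ⟨i - 1, by omega⟩
          subst hs
          rw [show pvBack cols (s + 1) = if pvLinked cols (s + 1) then pvBack cols s else s + 1
            from rfl, hL']
          simp
        refine ⟨?_, ?_, ?_, ?_⟩
        · rw [hstepA, hl']
          simp only [hmatch, Bool.false_eq_true, if_false]
          rw [pvStepB]
          rw [hr, pvRunAt_eq]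
          simp [hne, List.getD, hciE, hprevE, hL', hc, hpos]
        · rw [hstepA, hl']
          simp only [hmatch, Bool.false_eq_true, if_false]
          unfold pvRunAt
          simp [List.getD, hciE, hback]
        · rw [hstepA, hl']; simp only [hmatch, Bool.false_eq_true, if_false]; unfold pvPrev
          simp [List.getD, hciE]
        · rw [hstepA, hl']; simp only [hmatch, Bool.false_eq_true, if_false]; unfold pvPrev
          simp [List.getD, hciE]
  · -- separator token
    have hci : cols.getD i none = none := by rw [hcols]; simp [hsum]
    have hciE : cols[i]? = some none := pvGetD_to_get? cols i hin _ hci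
    have hstepA : pvStepA min_len st t =
        ((if st.2.1 ≥ min_len then st.1 + 1 else st.1), 0, none, none) := by
      simp [pvStepA, hsum]
    refine ⟨?_, ?_, ?_, ?_⟩
    · rw [hstepA]
      rw [pvStepB]
      rw [hr, pvRunAt_eq]
      simp [List.getD, hciE, hc]
    · rw [hstepA]; unfold pvRunAt; simp [List.getD, hciE]
    · rw [hstepA]; unfold pvPrev; simp [List.getD, hciE]
    · rw [hstepA]; unfold pvPrev; simp [List.getD, hciE]

lemma pvInv_all (seq : List (List Int)) (min_len : Int) (i : Nat) (hi : i ≤ seq.length) :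
    pvInv seq min_len i := by
  induction i with
  | zero => exact pvInv_zero seq min_len
  | succ k ih => exact pvInv_step seq min_len k (by omega) (ih (by omega))

-- ===== VERDICT (by name: the statement is the Claim_ definition above) =====
theorem count_crossovers_py_spec : Claim_equal_count_crossovers_py := by
  intro seq min_len _ _
  unfold Spec_count_crossovers_py count_crossovers_py count_crossovers_py_alt
  have h := pvInv_all seq min_len seq.length le_rfl
  unfold pvInv at h
  rw [List.take_length] at h
  obtain ⟨hc, hr, -, -⟩ := h
  simp only [pvCols_length] at hc
  show _ = (List.range ((pvCols seq).length + 1)).foldl (pvStepB (pvCols seq) (pvCols seq).length min_len) 0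
  rw [pvCols_length, List.range_succ, List.foldl_append, List.foldl_cons, List.foldl_nil, ← hc]
  rw [pvStepB]
  simp only [beq_self_eq_true, Bool.true_or, Bool.not_true, Bool.false_eq_true, if_false]
  rw [← pvRunAt_eq, ← hr]
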